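-- pv_equiv track=rewrite | github.com/caozxin/binary_search | rotated_sorted_array.py | findMin_classic
-- ===== SOURCE A (Python) =====
-- from typing import (
--     List,
-- )
--
-- def findMin_classic(nums: List[int]) -> int:
--     left, right = 0, len(nums) - 1
--     result = -1
--     target = nums[-1]
--
--     while left <= right:
--         mid = left + (right - left) // 2  # Calculate the middle index to avoid overflow.
--         #And it will be updated when there is any change to left or right
--
--         if nums[mid] == target:
--             result = mid
--             break # if look for 1st index of target, set right = mid - 1 to continue the search on left half
--                     # if look for last index of target, set left = mid + 1 to continue the search on right half
--         elif nums[mid] < target: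
--             left = mid + 1
--         else:
--             right = mid - 1
--
--     return result
-- ===== SOURCE B (Python) =====
-- def findMin_classic(nums):
--     # Recursive divide-and-conquer on sublists: search for nums[-1] in a window,
--     # carrying the window as an actual slice plus its global offset.
--     target = nums[-1]
--
--     def search(sub, offset):
--         if not sub:
--             return -1
--         mid = (len(sub) - 1) // 2
--         v = sub[mid]
--         if v == target:
--             return offset + mid
--         if v < target:
--             return search(sub[mid + 1:], offset + mid + 1)
--         return search(sub[:mid], offset)
--
--     return search(nums, 0)
-- ===== Notes on version B (the rewrite author's own statement) =====
-- stated objective: alternative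
-- what changed: A's iterative while-loop over integer bounds (left, right) with a result accumulator and break is replaced by a recursive divide-and-conquer helper that carries the current search window as an actual sublist (slice) plus its global offset, recursing on sub[mid+1:] or sub[:mid].
import Mathlib
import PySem

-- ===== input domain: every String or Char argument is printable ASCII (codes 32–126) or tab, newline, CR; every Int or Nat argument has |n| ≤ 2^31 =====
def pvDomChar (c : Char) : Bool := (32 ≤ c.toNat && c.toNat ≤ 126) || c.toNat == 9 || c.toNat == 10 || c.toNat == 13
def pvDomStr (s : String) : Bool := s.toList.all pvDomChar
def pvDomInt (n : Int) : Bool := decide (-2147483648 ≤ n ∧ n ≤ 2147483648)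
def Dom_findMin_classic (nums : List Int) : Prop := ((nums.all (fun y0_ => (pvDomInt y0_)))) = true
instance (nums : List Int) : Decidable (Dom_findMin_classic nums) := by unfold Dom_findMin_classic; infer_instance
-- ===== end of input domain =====

-- B replaces A's iterative loop over (left,right,result) by a divide-and-conquer
-- recursion on actual sublists (slice + global offset); return value only, no speed claim.


-- ===== PORT A =====
-- while left <= right: …  — the loop state (left, right, result); break returns mid.
-- nums[mid] is always in range when left ≤ right within [0, len-1], so pyGetD is exact there.
def findMin_classic_loop (nums : List Int) (target left right result : Int) : Int :=
  if h : left ≤ right then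
    let mid := left + PySem.Int.floordiv (right - left) 2
    let v := PySem.List.pyGetD nums mid 0
    if v = target then mid
    else if v < target then findMin_classic_loop nums target (mid + 1) right result
    else findMin_classic_loop nums target left (mid - 1) result
  else result
termination_by (right - left + 1).toNat
decreasing_by
  · have h2 : PySem.Int.floordiv (right - left) 2 = (right - left) / 2 :=
      PySem.Int.floordiv_eq_ediv_of_pos (by omega)
    simp only [h2]; omega
  · have h2 : PySem.Int.floordiv (right - left) 2 = (right - left) / 2 :=
      PySem.Int.floordiv_eq_ediv_of_pos (by omega)
    simp only [h2]; omega

-- target = the last element; empty input (IndexError) is excluded by Pre_.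
def findMin_classic (nums : List Int) : Int :=
  findMin_classic_loop nums (PySem.List.pyGetD nums (-1) 0) 0 ((nums.length : Int) - 1) (-1)

-- ===== PORT B =====
-- Source B's search(sub, offset): recursion on the sublist itself. All indices used here
-- (mid, mid+1) are nonnegative and in range of sub, so Nat indexing/slicing via
-- getD / drop / take is exact for Python's sub[mid], sub[mid+1:], sub[:mid].
def findMin_classic_search (target : Int) (sub : List Int) (offset : Nat) : Int :=
  if sub.isEmpty then -1
  else
    let mid := (sub.length - 1) / 2
    let v := sub.getD mid 0
    if v = target then ((offset + mid : Nat) : Int)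
    else if v < target then findMin_classic_search target (sub.drop (mid + 1)) (offset + mid + 1)
    else findMin_classic_search target (sub.take mid) offset
termination_by sub.length
decreasing_by
  · have : sub ≠ [] := by simpa [List.isEmpty_iff] using (by assumption : ¬ sub.isEmpty = true)
    have : 0 < sub.length := List.length_pos_of_ne_nil this
    simp only [List.length_drop]; omega
  · have : sub ≠ [] := by simpa [List.isEmpty_iff] using (by assumption : ¬ sub.isEmpty = true)
    have : 0 < sub.length := List.length_pos_of_ne_nil this
    simp only [List.length_take]; omega

def findMin_classic_alt (nums : List Int) : Int :=
  findMin_classic_search (PySem.List.pyGetD nums (-1) 0) nums 0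

-- ===== PRECONDITION & SPEC =====
-- A reads the last element first, so it raises IndexError on the empty list; Pre_ excludes exactly that.
def Pre_findMin_classic (nums : List Int) : Prop := nums ≠ []
instance (nums : List Int) : Decidable (Pre_findMin_classic nums) := by unfold Pre_findMin_classic; infer_instance
def pvWitness_findMin_classic : List Int := [3, 4, 5, 1, 2]

def Spec_findMin_classic (nums : List Int) (out : Int) : Prop := out = findMin_classic_alt nums
instance (nums : List Int) (out : Int) : Decidable (Spec_findMin_classic nums out) := by
  unfold Spec_findMin_classic; infer_instance

-- ===== CLAIM (what is proved, stated in full; the proofs are below) =====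
def Claim_equal_findMin_classic : Prop :=
  ∀ (nums : List Int), Dom_findMin_classic nums → Pre_findMin_classic nums →
    Spec_findMin_classic nums (findMin_classic nums)

-- ===== LEMMAS AND PROOFS =====

-- A's window [left, right] corresponds to B's sublist nums[left : right+1] with offset left.
theorem fmc_len (nums : List Int) (left right : Int) (hL : 0 ≤ left) (h : left ≤ right)
    (hR : right < (nums.length : Int)) :
    ((nums.drop left.toNat).take (right + 1 - left).toNat).length = (right + 1 - left).toNat := by
  simp only [List.length_take, List.length_drop]; omega

theorem fmc_mid (left right : Int) (hL : 0 ≤ left) (h : left ≤ right) :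
    left + PySem.Int.floordiv (right - left) 2
      = ((left.toNat + ((right + 1 - left).toNat - 1) / 2 : Nat) : Int) := by
  rw [PySem.Int.floordiv_eq_ediv_of_pos (by omega : (0:Int) < 2)]
  omega

theorem fmc_get (nums : List Int) (left right : Int) (hL : 0 ≤ left) (h : left ≤ right)
    (hR : right < (nums.length : Int)) :
    PySem.List.pyGetD nums (left + PySem.Int.floordiv (right - left) 2) 0
      = ((nums.drop left.toNat).take (right + 1 - left).toNat).getD
          (((right + 1 - left).toNat - 1) / 2) 0 := by
  have hmid := fmc_mid left right hL h
  have hlen := fmc_len nums left right hL h hR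
  have ht : 0 < (right + 1 - left).toNat := by omega
  have hlt : ((right + 1 - left).toNat - 1) / 2 < (right + 1 - left).toNat := by omega
  rw [hmid, List.getD_eq_getElem _ _ (by omega : ((right + 1 - left).toNat - 1) / 2 < _ ), ]
  · rw [PySem.List.pyGetD_natCast]
    rw [List.getElem_take, List.getElem_drop]
    rw [List.getD_eq_getElem _ _ (by simp only [List.length_drop, List.length_take] at hlen ⊢; omega)]

theorem findMin_classic_loop_eq_search (nums : List Int) (target : Int) :
    ∀ (left right : Int), 0 ≤ left → right < (nums.length : Int) →
      findMin_classic_loop nums target left right (-1)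
        = findMin_classic_search target
            ((nums.drop left.toNat).take (right + 1 - left).toNat) left.toNat := by
  intro left right
  refine findMin_classic_loop.induct nums target
    (motive := fun left right =>
      0 ≤ left → right < (nums.length : Int) →
      findMin_classic_loop nums target left right (-1)
        = findMin_classic_search target
            ((nums.drop left.toNat).take (right + 1 - left).toNat) left.toNat)
    ?_ ?_ ?_ ?_ left right
  case refine_4 =>
    intro left right h hL hR
    have ht : (right + 1 - left).toNat = 0 := by omega
    rw [findMin_classic_loop, findMin_classic_search]
    simp [h, ht]
  case refine_1 =>
    intro left right h mid v heq hL hR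
    have hv : v = PySem.List.pyGetD nums (left + PySem.Int.floordiv (right - left) 2) 0 := rfl
    rw [hv] at heq
    have hlen := fmc_len nums left right hL h hR
    have hget := fmc_get nums left right hL h hR
    have hmid := fmc_mid left right hL h
    have hne : ((nums.drop left.toNat).take (right + 1 - left).toNat).isEmpty = false := by
      rw [List.isEmpty_eq_false_iff_exists_mem]
      have : 0 < ((nums.drop left.toNat).take (right + 1 - left).toNat).length := by omega
      exact List.exists_mem_of_length_pos this
    rw [findMin_classic_loop, findMin_classic_search]
    simp only [dif_pos h, hne, Bool.false_eq_true, if_false, hlen]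
    rw [if_pos heq, if_pos (hget ▸ heq)]
    exact hmid
  case refine_2 =>
    intro left right h mid v hne hlt ih hL hR
    have hv : v = PySem.List.pyGetD nums (left + PySem.Int.floordiv (right - left) 2) 0 := rfl
    have hm : mid = left + PySem.Int.floordiv (right - left) 2 := rfl
    rw [hv] at hne hlt
    rw [hm] at ih
    have hlen := fmc_len nums left right hL h hR
    have hget := fmc_get nums left right hL h hR
    have hmid := fmc_mid left right hL h
    have hEmp : ((nums.drop left.toNat).take (right + 1 - left).toNat).isEmpty = false := by
      rw [List.isEmpty_eq_false_iff_exists_mem]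
      have : 0 < ((nums.drop left.toNat).take (right + 1 - left).toNat).length := by omega
      exact List.exists_mem_of_length_pos this
    rw [findMin_classic_loop, findMin_classic_search]
    simp only [dif_pos h, hEmp, Bool.false_eq_true, if_false, hlen, hget]
    rw [hget] at hne hlt
    simp only [if_neg hne, if_pos hlt]
    have hfd := PySem.Int.floordiv_eq_ediv_of_pos (a := right - left) (show (0:Int) < 2 by omega)
    have e1 : ((nums.drop left.toNat).take (right + 1 - left).toNat).drop
          (((right + 1 - left).toNat - 1) / 2 + 1)
        = (nums.drop (left + PySem.Int.floordiv (right - left) 2 + 1).toNat).take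
            ((right + 1 - (left + PySem.Int.floordiv (right - left) 2 + 1)).toNat) := by
      rw [List.drop_take, List.drop_drop, hfd]
      congr 1
      · omega
      · congr 1; omega
    have e2 : left.toNat + ((right + 1 - left).toNat - 1) / 2 + 1
        = (left + PySem.Int.floordiv (right - left) 2 + 1).toNat := by omega
    rw [ih (by omega) hR, e1, e2]
  case refine_3 =>
    intro left right h mid v hne hge ih hL hR
    have hv : v = PySem.List.pyGetD nums (left + PySem.Int.floordiv (right - left) 2) 0 := rfl
    have hm : mid = left + PySem.Int.floordiv (right - left) 2 := rfl
    rw [hv] at hne hge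
    rw [hm] at ih
    have hlen := fmc_len nums left right hL h hR
    have hget := fmc_get nums left right hL h hR
    have hmid := fmc_mid left right hL h
    have hEmp : ((nums.drop left.toNat).take (right + 1 - left).toNat).isEmpty = false := by
      rw [List.isEmpty_eq_false_iff_exists_mem]
      have : 0 < ((nums.drop left.toNat).take (right + 1 - left).toNat).length := by omega
      exact List.exists_mem_of_length_pos this
    rw [findMin_classic_loop, findMin_classic_search]
    simp only [dif_pos h, hEmp, Bool.false_eq_true, if_false, hlen, hget]
    rw [hget] at hne hge
    simp only [if_neg hne, if_neg hge]
    have hfd := PySem.Int.floordiv_eq_ediv_of_pos (a := right - left) (show (0:Int) < 2 by omega)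
    have e1 : ((nums.drop left.toNat).take (right + 1 - left).toNat).take
          (((right + 1 - left).toNat - 1) / 2)
        = (nums.drop left.toNat).take
            ((left + PySem.Int.floordiv (right - left) 2 - 1 + 1 - left).toNat) := by
      rw [List.take_take, hfd]
      congr 1
      omega
    rw [ih hL (by omega), e1]

-- ===== VERDICT (by name: the statement is the Claim_ definition above) =====
theorem findMin_classic_spec : Claim_equal_findMin_classic := by
  intro nums _ _
  unfold Spec_findMin_classic findMin_classic findMin_classic_alt
  have h := findMin_classic_loop_eq_search nums (PySem.List.pyGetD nums (-1) 0)
    0 ((nums.length : Int) - 1) (by omega) (by omega)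
  simpa using h
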